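-- pv_equiv track=rewrite | github.com/epayet/advent-of-code | advent/twentythree/day1.py | solve
-- ===== SOURCE A (Python) =====
-- numbers = ['zero', 'one', 'two', 'three', 'four', 'five', 'six', 'seven', 'eight', 'nine']
--
-- letter_map = {n: i for i, n in enumerate(numbers)}
--
-- def solve(codes):
--     total = 0
--     for code in codes:
--         first_number = get_first_number(code)
--         second_number = get_second_number(code)
--         number = int(f"{first_number}{second_number}")
--         total += number
--     return total
--
-- def get_first_number(code):
--     earliest = -1
--     found_number = None
--     for number in numbers:
--         found = code.find(number)
--         if found == -1:
--             continue
--         if earliest == -1 or found < earliest: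
--             earliest = found
--             found_number = number
--     return letter_map[found_number]
--
-- def get_second_number(code):
--     latest = None
--     found_number = None
--     for number in numbers:
--         found = code.rfind(number)
--         if found == -1:
--             continue
--         if latest is None or found > latest:
--             latest = found
--             found_number = number
--     return letter_map[found_number]
-- ===== SOURCE B (Python) =====
-- numbers = ['zero', 'one', 'two', 'three', 'four', 'five', 'six', 'seven', 'eight', 'nine']
--
-- def _digit_at(code, i):
--     for digit, word in enumerate(numbers):
--         if code.startswith(word, i):
--             return digit
--     return None
--
-- def _first_digit(code):
--     for i in range(len(code)):
--         d = _digit_at(code, i)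
--         if d is not None:
--             return d
--     raise ValueError("no spelled-out digit in code")
--
-- def _second_digit(code):
--     for i in reversed(range(len(code))):
--         d = _digit_at(code, i)
--         if d is not None:
--             return d
--     raise ValueError("no spelled-out digit in code")
--
-- def solve(codes):
--     total = 0
--     for code in codes:
--         total += 10 * _first_digit(code) + _second_digit(code)
--     return total
-- ===== Notes on version B (the rewrite author's own statement) =====
-- stated objective: alternative
-- what changed: Per code, A runs ten full-string find scans and ten rfind scans and folds an argmin/argmax over them; B makes one left-to-right and one right-to-left positional scan, returning the first digit word that starts at the current position, and sums 10*first+second directly.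
import Mathlib
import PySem

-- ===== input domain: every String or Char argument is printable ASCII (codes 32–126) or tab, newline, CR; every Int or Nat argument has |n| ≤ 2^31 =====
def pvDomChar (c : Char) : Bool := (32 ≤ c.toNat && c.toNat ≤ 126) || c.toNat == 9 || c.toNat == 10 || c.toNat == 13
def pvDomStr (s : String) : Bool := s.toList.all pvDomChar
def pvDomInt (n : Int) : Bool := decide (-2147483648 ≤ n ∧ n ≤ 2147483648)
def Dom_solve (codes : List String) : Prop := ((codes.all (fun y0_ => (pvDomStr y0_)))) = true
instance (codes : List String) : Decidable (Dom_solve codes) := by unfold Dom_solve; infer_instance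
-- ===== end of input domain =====

-- B replaces A's ten full-string find/rfind scans and argmin/argmax folds per code with one
-- left-to-right and one right-to-left positional scan stopping at the first digit-word start
-- (objective: alternative).

-- ===== PORT A =====
def numbersA : List String :=
  ["zero", "one", "two", "three", "four", "five", "six", "seven", "eight", "nine"]

-- letter_map = {n: i for i, n in enumerate(numbers)}
def letterMapA : PySem.Dict String Int :=
  (PySem.List.enumerate numbersA).foldl (fun d p => d.insert p.2 p.1) PySem.Dict.empty

def getFirstA (code : String) : Option Int :=
  let st := numbersA.foldl
    (fun (st : Int × Option String) number =>
      let found := PySem.Str.find code number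
      if found = -1 then st
      else if st.1 = -1 ∨ found < st.1 then (found, some number) else st)
    (-1, none)
  match st.2 with
  | none => none
  | some w => letterMapA.get? w

def getSecondA (code : String) : Option Int :=
  let st := numbersA.foldl
    (fun (st : Option Int × Option String) number =>
      let found := PySem.Str.rfind code number
      if found = -1 then st
      else
        match st.1 with
        | none => (some found, some number)
        | some l => if found > l then (some found, some number) else st)
    (none, none)
  match st.2 with
  | none => none
  | some w => letterMapA.get? w

def digitAtB (t : List Char) : Option Int :=
  (numbersA.findIdx? (fun w => PySem.Chars.startswith t w.toList)).map Int.ofNat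

def scanFwdB : List Char → Option Int
  | [] => none
  | c :: rest =>
    match digitAtB (c :: rest) with
    | some d => some d
    | none => scanFwdB rest

def scanBwdB : List Char → Option Int
  | [] => none
  | c :: rest =>
    match scanBwdB rest with
    | some d => some d
    | none => digitAtB (c :: rest)

def solve (codes : List String) : Int :=
  (codes.foldl
    (fun (acc : Option Int) code => do
      let total ← acc
      let first ← getFirstA code
      let second ← getSecondA code
      let number ← PySem.Int.ofChars? (PySem.Int.toChars first ++ PySem.Int.toChars second)
      pure (total + number))
    (some 0)).getD 0

-- ===== PORT B =====
-- (digitAtB, scanFwdB, scanBwdB above transliterate Source B's _digit_at / _first_digit / _second_digit;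
-- both Pythons share the module constant `numbers` = numbersA)
def solve_alt (codes : List String) : Int :=
  (codes.foldl
    (fun (acc : Option Int) code => do
      let total ← acc
      let first ← scanFwdB code.toList
      let second ← scanBwdB code.toList
      pure (total + (10 * first + second)))
    (some 0)).getD 0

-- ===== PRECONDITION & SPEC =====
-- Pre_ excludes exactly the inputs where some code contains no spelled-out digit word:
-- there Python A raises KeyError (letter_map[None]) and returns nothing (B raises ValueError).
def Pre_solve (codes : List String) : Prop :=
  (codes.all (fun c =>
    ["zero", "one", "two", "three", "four", "five", "six", "seven", "eight", "nine"].any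
      (fun w => PySem.Str.isIn w c))) = true
instance (codes : List String) : Decidable (Pre_solve codes) := by unfold Pre_solve; infer_instance

def pvWitness_solve : List String := ["one2three"]

def Spec_solve (codes : List String) (out : Int) : Prop := out = solve_alt codes
instance (codes : List String) (out : Int) : Decidable (Spec_solve codes out) := by unfold Spec_solve; infer_instance

-- ===== CLAIM (what is proved, stated in full; the proofs are below) =====
def Claim_equal_solve : Prop := ∀ (codes : List String), Dom_solve codes → Pre_solve codes → Spec_solve codes (solve codes)

-- ===== LEMMAS AND PROOFS =====

-- Python-exact facts about str.find / str.rfind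
theorem find_go_shift (sub : List Char) : ∀ (t : List Char) (k : Nat),
    PySem.Chars.find.go sub t k = if PySem.Chars.find t sub = -1 then -1 else PySem.Chars.find t sub + k := by
  intro t
  induction t with
  | nil => intro k; simp [PySem.Chars.find.go, PySem.Chars.find]; split <;> [omega; rfl]
  | cons c r ih =>
    intro k
    have hge := PySem.Chars.neg_one_le_find (s := r) (sub := sub)
    rw [PySem.Chars.find.go, ih (k+1)]
    conv_rhs => rw [show PySem.Chars.find (c :: r) sub = PySem.Chars.find.go sub (c :: r) 0 from rfl,
      PySem.Chars.find.go, ih (0+1)]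
    by_cases h : sub.isPrefixOf (c :: r) = true <;> simp [h] <;> split_ifs <;> simp_all <;> push_cast <;> try omega

theorem find_cons (c : Char) (t sub : List Char) :
    PySem.Chars.find (c :: t) sub =
      if sub.isPrefixOf (c :: t) then 0
      else if PySem.Chars.find t sub = -1 then -1 else PySem.Chars.find t sub + 1 := by
  rw [show PySem.Chars.find (c :: t) sub = PySem.Chars.find.go sub (c :: t) 0 from rfl]
  rw [PySem.Chars.find.go]
  split
  · rfl
  · rw [find_go_shift]; split_ifs <;> simp

theorem find_nil' (sub : List Char) (h : sub ≠ []) : PySem.Chars.find [] sub = -1 := by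
  rw [show PySem.Chars.find [] sub = PySem.Chars.find.go sub [] 0 from rfl]
  rw [PySem.Chars.find.go]
  simp [List.isEmpty_iff, h]

theorem find_eq_zero_iff (t sub : List Char) : PySem.Chars.find t sub = 0 ↔ sub <+: t := by
  constructor
  · intro h
    have := PySem.Chars.find_spec (s := t) (sub := sub) (by omega)
    rw [h] at this
    simpa using this.1
  · intro h
    have h1 : PySem.Chars.find t sub ≠ -1 := by
      rw [PySem.Chars.find_ne_neg_one_iff]
      exact h.isInfix
    have h2 : 0 ≤ PySem.Chars.find t sub := by
      have := PySem.Chars.neg_one_le_find (s := t) (sub := sub); omega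
    have := PySem.Chars.find_spec (s := t) (sub := sub) h2
    by_contra hne
    have hpos : 0 < (PySem.Chars.find t sub).toNat := by omega
    exact this.2 0 hpos (by simpa using h)


theorem rfind_go_ge (s sub : List Char) : ∀ j : Nat, -1 ≤ PySem.Chars.rfind.go s sub j := by
  intro j
  induction j with
  | zero => rw [PySem.Chars.rfind.go]; split <;> simp
  | succ j ih => rw [PySem.Chars.rfind.go]; split <;> [omega; exact ih]

theorem rfind_ge (s sub : List Char) : -1 ≤ PySem.Chars.rfind s sub := rfind_go_ge s sub s.length

theorem rfind_go_cons (c : Char) (t sub : List Char) : ∀ j : Nat,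
    PySem.Chars.rfind.go (c :: t) sub (j + 1) =
      if PySem.Chars.rfind.go t sub j = -1 then (if sub.isPrefixOf (c :: t) then 0 else -1)
      else PySem.Chars.rfind.go t sub j + 1 := by
  intro j
  induction j with
  | zero =>
    simp only [PySem.Chars.rfind.go, List.drop_succ_cons, List.drop_zero]
    split <;> split <;> simp_all
  | succ j ih =>
    rw [PySem.Chars.rfind.go]
    conv_rhs => rw [PySem.Chars.rfind.go.eq_def]
    simp only [List.drop_succ_cons]
    have hge := rfind_go_ge t sub j
    split <;> [skip; exact ih] <;> split_ifs <;> simp_all <;> push_cast <;> omega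

theorem rfind_cons (c : Char) (t sub : List Char) :
    PySem.Chars.rfind (c :: t) sub =
      if PySem.Chars.rfind t sub = -1 then (if sub.isPrefixOf (c :: t) then 0 else -1)
      else PySem.Chars.rfind t sub + 1 := by
  rw [show PySem.Chars.rfind (c :: t) sub = PySem.Chars.rfind.go (c :: t) sub (t.length + 1) from rfl]
  rw [rfind_go_cons]
  rfl

theorem rfind_nil (sub : List Char) (h : sub ≠ []) : PySem.Chars.rfind [] sub = -1 := by
  rw [show PySem.Chars.rfind [] sub = PySem.Chars.rfind.go [] sub 0 from rfl]
  rw [PySem.Chars.rfind.go]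
  simp [List.isPrefixOf_iff_prefix, h]

-- proof-side names for the two ports' fold bodies
def stepF (f : String → Int) (st : Int × Option String) (w : String) : Int × Option String :=
  let found := f w
  if found = -1 then st
  else if st.1 = -1 ∨ found < st.1 then (found, some w) else st

def stepG (g : String → Int) (st : Option Int × Option String) (w : String) : Option Int × Option String :=
  let found := g w
  if found = -1 then st
  else
    match st.1 with
    | none => (some found, some w)
    | some l => if found > l then (some found, some w) else st

theorem F1 (f : String → Int) : ∀ (ws : List String) (st : Int × Option String),
    (∀ w ∈ ws, f w = -1) → ws.foldl (stepF f) st = st := by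
  intro ws
  induction ws with
  | nil => intro st h; rfl
  | cons w rest ih =>
    intro st h
    have hw : f w = -1 := h w (by simp)
    simp only [List.foldl_cons, stepF, hw]
    exact ih st (fun x hx => h x (by simp [hx]))

theorem F2 (f : String → Int) : ∀ (ws : List String) (w0 : String),
    (∀ w ∈ ws, -1 ≤ f w) → ws.foldl (stepF f) (0, some w0) = (0, some w0) := by
  intro ws
  induction ws with
  | nil => intro w0 h; rfl
  | cons w rest ih =>
    intro w0 h
    have hw : -1 ≤ f w := h w (by simp)
    simp only [List.foldl_cons, stepF]
    have h1 : ((0 : Int), some w0).1 = 0 := rfl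
    by_cases hm : f w = -1
    · simp only [hm, if_pos rfl]; exact ih w0 (fun x hx => h x (by simp [hx]))
    · have : ¬ (((0:Int), some w0).1 = -1 ∨ f w < ((0:Int), some w0).1) := by
        simp; omega
      simp only [if_neg hm, if_neg this]
      exact ih w0 (fun x hx => h x (by simp [hx]))

theorem F3 (f : String → Int) (p : String → Bool) : ∀ (ws : List String) (w0 : String)
    (e : Int) (wo : Option String),
    (∀ w ∈ ws, -1 ≤ f w) → (∀ w ∈ ws, (p w = true ↔ f w = 0)) →
    (e = -1 ∨ 1 ≤ e) → ws.find? p = some w0 →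
    (ws.foldl (stepF f) (e, wo)).2 = some w0 := by
  intro ws
  induction ws with
  | nil => intro w0 e wo _ _ _ hf; simp at hf
  | cons w rest ih =>
    intro w0 e wo hb hz he hf
    by_cases hp : p w = true
    · have hw0 : w = w0 := by rw [List.find?_cons_of_pos hp] at hf; exact Option.some.inj hf
      have hfz : f w = 0 := ((hz w (by simp)).1 hp)
      simp only [List.foldl_cons, stepF, hfz]
      have hcond : (e, wo).1 = -1 ∨ (0:Int) < (e, wo).1 := by simpa using he
      rw [if_neg (by norm_num), if_pos (by simpa using he.imp id (fun h => by omega))]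
      rw [hw0] at *
      rw [F2 f rest w0 (fun x hx => hb x (by simp [hx]))]
    · have hf' : rest.find? p = some w0 := by rwa [List.find?_cons_of_neg (by simpa using hp)] at hf
      have hfz : f w ≠ 0 := fun h => hp ((hz w (by simp)).2 h)
      have hbw : -1 ≤ f w := hb w (by simp)
      simp only [List.foldl_cons, stepF]
      by_cases hm : f w = -1
      · simp only [hm, if_pos rfl]
        exact ih w0 e wo (fun x hx => hb x (by simp [hx])) (fun x hx => hz x (by simp [hx])) he hf'
      · rw [if_neg hm]
        by_cases hc : (e, wo).1 = -1 ∨ f w < (e, wo).1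
        · rw [if_pos hc]
          exact ih w0 (f w) (some w) (fun x hx => hb x (by simp [hx])) (fun x hx => hz x (by simp [hx]))
            (Or.inr (by omega)) hf'
        · rw [if_neg hc]
          exact ih w0 e wo (fun x hx => hb x (by simp [hx])) (fun x hx => hz x (by simp [hx])) he hf'

def RF (st st' : Int × Option String) : Prop :=
  st.2 = st'.2 ∧ ((st.1 = -1 ∧ st'.1 = -1) ∨ (0 ≤ st.1 ∧ st'.1 = st.1 + 1))

theorem F4 (f f' : String → Int) : ∀ (ws : List String) (st st' : Int × Option String),
    (∀ w ∈ ws, f' w = if f w = -1 then -1 else f w + 1) → (∀ w ∈ ws, -1 ≤ f w) →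
    RF st st' → RF (ws.foldl (stepF f) st) (ws.foldl (stepF f') st') := by
  intro ws
  induction ws with
  | nil => intro st st' _ _ h; exact h
  | cons w rest ih =>
    intro st st' hf hb hR
    simp only [List.foldl_cons]
    apply ih _ _ (fun x hx => hf x (by simp [hx])) (fun x hx => hb x (by simp [hx]))
    have hfw : f' w = if f w = -1 then -1 else f w + 1 := hf w (by simp)
    have hbw : -1 ≤ f w := hb w (by simp)
    obtain ⟨h2, h1⟩ := hR
    by_cases hm : f w = -1
    · simp only [stepF, hm, hfw, if_pos rfl]; exact ⟨h2, h1⟩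
    · have hf'w : f' w = f w + 1 := by rw [hfw, if_neg hm]
      have hf'm : f' w ≠ -1 := by omega
      simp only [stepF, if_neg hm, if_neg hf'm]
      rcases h1 with ⟨ha, hb'⟩ | ⟨ha, hb'⟩
      · rw [if_pos (Or.inl ha), if_pos (Or.inl hb')]
        exact ⟨rfl, Or.inr (by omega)⟩
      · by_cases hc : f w < st.1
        · rw [if_pos (Or.inr hc), if_pos (Or.inr (by omega))]
          exact ⟨rfl, Or.inr (by omega)⟩
        · rw [if_neg (by omega), if_neg (by omega)]
          exact ⟨h2, Or.inr ⟨ha, hb'⟩⟩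

theorem G1 (g : String → Int) : ∀ (ws : List String) (st : Option Int × Option String),
    (∀ w ∈ ws, g w = -1) → ws.foldl (stepG g) st = st := by
  intro ws
  induction ws with
  | nil => intro st h; rfl
  | cons w rest ih =>
    intro st h
    simp only [List.foldl_cons, stepG, h w (by simp), if_pos rfl]
    exact ih st (fun x hx => h x (by simp [hx]))

theorem G4 (g : String → Int) : ∀ (ws : List String) (w0 : String),
    (∀ w ∈ ws, g w ≤ 0) → ws.foldl (stepG g) (some 0, some w0) = (some 0, some w0) := by
  intro ws
  induction ws with
  | nil => intro w0 h; rfl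
  | cons w rest ih =>
    intro w0 h
    have hw : g w ≤ 0 := h w (by simp)
    simp only [List.foldl_cons, stepG]
    by_cases hm : g w = -1
    · simp only [hm, if_pos rfl]; exact ih w0 (fun x hx => h x (by simp [hx]))
    · rw [if_neg hm]
      have : ¬ g w > (0 : Int) := by omega
      simp only [this, if_neg (by omega : ¬ g w > (0:Int))]
      exact ih w0 (fun x hx => h x (by simp [hx]))

theorem G3 (g : String → Int) (p : String → Bool) : ∀ (ws : List String),
    (∀ w ∈ ws, g w = -1 ∨ g w = 0) → (∀ w ∈ ws, (p w = true ↔ g w = 0)) →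
    (ws.foldl (stepG g) (none, none)).2 = ws.find? p := by
  intro ws
  induction ws with
  | nil => intro _ _; rfl
  | cons w rest ih =>
    intro h01 hz
    by_cases hp : p w = true
    · have hgz : g w = 0 := (hz w (by simp)).1 hp
      rw [List.find?_cons_of_pos hp]
      simp only [List.foldl_cons, stepG, hgz]
      norm_num
      rw [G4 g rest w (fun x hx => by rcases h01 x (by simp [hx]) with h | h <;> omega)]
    · have hgm : g w = -1 := by
        rcases h01 w (by simp) with h | h
        · exact h
        · exact absurd ((hz w (by simp)).2 h) hp
      rw [List.find?_cons_of_neg (by simpa using hp)]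
      simp only [List.foldl_cons, stepG, hgm, if_pos rfl]
      exact ih (fun x hx => h01 x (by simp [hx])) (fun x hx => hz x (by simp [hx]))

theorem Gsome (g : String → Int) : ∀ (ws : List String) (l : Int) (wo : Option String),
    ∃ l' wo', ws.foldl (stepG g) (some l, wo) = (some l', wo') := by
  intro ws
  induction ws with
  | nil => intro l wo; exact ⟨l, wo, rfl⟩
  | cons w rest ih =>
    intro l wo
    simp only [List.foldl_cons, stepG]
    by_cases hm : g w = -1
    · simp only [hm, if_pos rfl]; exact ih l wo
    · rw [if_neg hm]
      by_cases hc : g w > l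
      · simp only [if_pos hc]; exact ih (g w) (some w)
      · simp only [if_neg hc]; exact ih l wo

theorem Gchar (g : String → Int) : ∀ (ws : List String),
    ((ws.foldl (stepG g) (none, none)).1 = none ↔ ∀ w ∈ ws, g w = -1) := by
  intro ws
  induction ws with
  | nil => simp
  | cons w rest ih =>
    simp only [List.foldl_cons, stepG]
    by_cases hm : g w = -1
    · simp only [hm, if_pos rfl]
      constructor
      · intro h x hx
        rcases List.mem_cons.1 hx with rfl | hx'
        · exact hm
        · exact ih.1 h x hx'
      · intro h; exact ih.2 (fun x hx => h x (by simp [hx]))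
    · rw [if_neg hm]
      obtain ⟨l', wo', heq⟩ := Gsome g rest (g w) (some w)
      rw [heq]
      constructor
      · intro h; simp at h
      · intro h; exact absurd (h w (by simp)) hm

def ShapeG (st : Option Int × Option String) : Prop :=
  st = (none, none) ∨ ∃ l w, 0 ≤ l ∧ st = (some l, some w)

theorem G6 (g : String → Int) : ∀ (ws : List String) (st : Option Int × Option String),
    (∀ w ∈ ws, -1 ≤ g w) → ShapeG st → ShapeG (ws.foldl (stepG g) st) := by
  intro ws
  induction ws with
  | nil => intro st _ h; exact h
  | cons w rest ih =>
    intro st hb hS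
    simp only [List.foldl_cons]
    apply ih _ (fun x hx => hb x (by simp [hx]))
    have hbw : -1 ≤ g w := hb w (by simp)
    by_cases hm : g w = -1
    · simp only [stepG, hm, if_pos rfl]; exact hS
    · rcases hS with h | ⟨l, w', hl, h⟩
      · subst h; simp only [stepG, if_neg hm]
        exact Or.inr ⟨g w, w, by omega, rfl⟩
      · subst h; simp only [stepG, if_neg hm]
        by_cases hc : g w > l
        · simp only [if_pos hc]; exact Or.inr ⟨g w, w, by omega, rfl⟩
        · simp only [if_neg hc]; exact Or.inr ⟨l, w', hl, rfl⟩

def RG (st st' : Option Int × Option String) : Prop :=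
  (st = (none, none) ∧ (st' = (none, none) ∨ ∃ w0, st' = (some 0, some w0))) ∨
  (∃ l w, 0 ≤ l ∧ st = (some l, some w) ∧ st' = (some (l + 1), some w))

theorem G5 (g g' : String → Int) (p : String → Bool) : ∀ (ws : List String)
    (st st' : Option Int × Option String),
    (∀ w ∈ ws, g' w = if g w = -1 then (if p w then 0 else -1) else g w + 1) →
    (∀ w ∈ ws, -1 ≤ g w) →
    RG st st' → RG (ws.foldl (stepG g) st) (ws.foldl (stepG g') st') := by
  intro ws
  induction ws with
  | nil => intro st st' _ _ h; exact h
  | cons w rest ih =>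
    intro st st' hg hb hR
    simp only [List.foldl_cons]
    apply ih _ _ (fun x hx => hg x (by simp [hx])) (fun x hx => hb x (by simp [hx]))
    have hgw : g' w = if g w = -1 then (if p w then 0 else -1) else g w + 1 := hg w (by simp)
    have hbw : -1 ≤ g w := hb w (by simp)
    by_cases hm : g w = -1
    · -- g' w is 0 or -1
      by_cases hp : p w = true
      · have hg'w : g' w = 0 := by rw [hgw, if_pos hm, if_pos hp]
        rcases hR with ⟨h1, h2⟩ | ⟨l, w', hl, h1, h2⟩
        · subst h1
          simp only [stepG, hm, if_pos rfl, hg'w]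
          rcases h2 with h2 | ⟨w0, h2⟩ <;> subst h2
          · exact Or.inl ⟨rfl, Or.inr ⟨w, by norm_num⟩⟩
          · simp only [if_neg (by omega : ¬ (0:Int) > 0)]
            exact Or.inl ⟨rfl, Or.inr ⟨w0, rfl⟩⟩
        · subst h1; subst h2
          simp only [stepG, hm, if_pos rfl, hg'w]
          simp only [if_neg (by omega : ¬ (0:Int) > l + 1)]
          exact Or.inr ⟨l, w', hl, rfl, rfl⟩
      · have hg'w : g' w = -1 := by rw [hgw, if_pos hm, if_neg hp]
        simp only [stepG, hm, hg'w, if_pos rfl]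
        exact hR
    · have hg'w : g' w = g w + 1 := by rw [hgw, if_neg hm]
      have hg'm : g' w ≠ -1 := by omega
      rcases hR with ⟨h1, h2⟩ | ⟨l, w', hl, h1, h2⟩
      · subst h1
        simp only [stepG, if_neg hm, hg'w, if_neg (show ¬ g w + 1 = -1 by omega)]
        rcases h2 with h2 | ⟨w0, h2⟩ <;> subst h2
        · exact Or.inr ⟨g w, w, by omega, rfl, rfl⟩
        · simp only [if_pos (by omega : g w + 1 > (0:Int))]
          exact Or.inr ⟨g w, w, by omega, rfl, rfl⟩
      · subst h1; subst h2
        simp only [stepG, if_neg hm, hg'w, if_neg (show ¬ g w + 1 = -1 by omega)]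
        by_cases hc : g w > l
        · simp only [if_pos hc, if_pos (by omega : g w + 1 > l + 1)]
          exact Or.inr ⟨g w, w, by omega, rfl, rfl⟩
        · simp only [if_neg hc, if_neg (by omega : ¬ g w + 1 > l + 1)]
          exact Or.inr ⟨l, w', hl, rfl, rfl⟩

-- word-level reference scans
def scanWF : List Char → Option String
  | [] => none
  | c :: r =>
    match numbersA.find? (fun w => w.toList.isPrefixOf (c :: r)) with
    | some w => some w
    | none => scanWF r

def scanWB : List Char → Option String
  | [] => none
  | c :: r =>
    match scanWB r with
    | some w => some w
    | none => numbersA.find? (fun w => w.toList.isPrefixOf (c :: r))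

theorem words_ne_nil : ∀ w ∈ numbersA, w.toList ≠ [] := by decide

theorem fwd_main (s : List Char) :
    (numbersA.foldl (stepF (fun w => PySem.Chars.find s w.toList)) (-1, none)).2 = scanWF s := by
  induction s with
  | nil =>
    rw [F1 _ _ _ (fun w hw => find_nil' w.toList (words_ne_nil w hw))]
    rfl
  | cons c r ih =>
    rw [scanWF]
    cases h : numbersA.find? (fun w => w.toList.isPrefixOf (c :: r)) with
    | some w0 =>
      exact F3 _ _ numbersA w0 (-1) none
        (fun w _ => PySem.Chars.neg_one_le_find _ _)
        (fun w _ => by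
          beta_reduce
          rw [List.isPrefixOf_iff_prefix]
          exact (find_eq_zero_iff (c :: r) w.toList).symm)
        (Or.inl rfl) h
    | none =>
      have hnp : ∀ w ∈ numbersA, ¬ (w.toList.isPrefixOf (c :: r) = true) := by
        intro w hw
        have := List.find?_eq_none.1 h w hw
        simpa using this
      have hR := F4 (fun w => PySem.Chars.find r w.toList)
        (fun w => PySem.Chars.find (c :: r) w.toList) numbersA (-1, none) (-1, none)
        (fun w hw => by
          beta_reduce
          rw [find_cons, if_neg (by simpa using hnp w hw)])
        (fun w _ => PySem.Chars.neg_one_le_find _ _)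
        ⟨rfl, Or.inl ⟨rfl, rfl⟩⟩
      rw [← hR.1, ih]

theorem bwd_main (s : List Char) :
    (numbersA.foldl (stepG (fun w => PySem.Chars.rfind s w.toList)) (none, none)).2 = scanWB s := by
  induction s with
  | nil =>
    rw [G1 _ _ _ (fun w hw => rfind_nil w.toList (words_ne_nil w hw))]
    rfl
  | cons c r ih =>
    rw [scanWB]
    have hb : ∀ w ∈ numbersA, -1 ≤ PySem.Chars.rfind r w.toList := fun w _ => rfind_ge _ _
    cases hfst : (numbersA.foldl (stepG (fun w => PySem.Chars.rfind r w.toList)) (none, none)).1 with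
    | none =>
      have hall : ∀ w ∈ numbersA, PySem.Chars.rfind r w.toList = -1 := (Gchar _ numbersA).1 hfst
      have hsnd : (numbersA.foldl (stepG (fun w => PySem.Chars.rfind r w.toList)) (none, none)).2 = none := by
        rcases G6 _ numbersA (none, none) hb (Or.inl rfl) with h | ⟨l, w', _, h⟩
        · rw [h]
        · rw [h] at hfst; simp at hfst
      rw [← ih, hsnd]
      exact G3 _ _ numbersA
        (fun w hw => by
          beta_reduce
          rw [rfind_cons, if_pos (hall w hw)]
          by_cases hp : w.toList.isPrefixOf (c :: r) = true <;> simp [hp])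
        (fun w hw => by
          beta_reduce
          rw [rfind_cons, if_pos (hall w hw)]
          by_cases hp : w.toList.isPrefixOf (c :: r) = true <;> simp [hp])
    | some l =>
      obtain hS := G6 _ numbersA (none, none) hb (Or.inl rfl)
      rcases hS with h | ⟨l', w', hl', h⟩
      · rw [h] at hfst; simp at hfst
      · have hl : l = l' := by rw [h] at hfst; simpa using hfst.symm
        subst hl
        have hR := G5 (fun w => PySem.Chars.rfind r w.toList)
          (fun w => PySem.Chars.rfind (c :: r) w.toList)
          (fun w => w.toList.isPrefixOf (c :: r)) numbersA (none, none) (none, none)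
          (fun w _ => by beta_reduce; rw [rfind_cons])
          hb
          (Or.inl ⟨rfl, Or.inl rfl⟩)
        rcases hR with ⟨h1, _⟩ | ⟨l2, w2, _, h1, h2⟩
        · rw [h] at h1; simp at h1
        · have hlw : l = l2 ∧ w' = w2 := by rw [h] at h1; simpa using h1
          obtain ⟨rfl, rfl⟩ := hlw
          have hsr : scanWB r = some w' := by rw [← ih, h]
          rw [h2, hsr]

theorem lmGet : ∀ (k : Nat) (hk : k < 10),
    letterMapA.get? (numbersA[k]'(by simpa [numbersA] using hk)) = some (k : Int) := by
  decide

theorem idxLink (t : List Char) :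
    (match numbersA.find? (fun w => w.toList.isPrefixOf t) with
     | none => (none : Option Int)
     | some w => letterMapA.get? w) = digitAtB t := by
  rw [digitAtB]
  simp only [PySem.Chars.startswith]
  cases hI : numbersA.findIdx? (fun w => w.toList.isPrefixOf t) with
  | none =>
    have : numbersA.find? (fun w => w.toList.isPrefixOf t) = none :=
      List.find?_eq_none.2 (fun x hx => by simp [List.findIdx?_eq_none_iff.1 hI x hx])
    rw [this]
    simp
  | some k =>
    obtain ⟨hk, hp, hj⟩ := List.findIdx?_eq_some_iff_getElem.1 hI
    have : numbersA.find? (fun w => w.toList.isPrefixOf t) = some (numbersA[k]'hk) :=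
      List.find?_eq_some_iff_getElem.2 ⟨hp, k, hk, rfl, fun j hj' => by simp [hj j hj']⟩
    rw [this]
    simpa using lmGet k (by simpa [numbersA] using hk)

theorem digitAtB_none_iff (t : List Char) :
    digitAtB t = none ↔ numbersA.find? (fun w => w.toList.isPrefixOf t) = none := by
  rw [digitAtB]
  simp only [PySem.Chars.startswith, Option.map_eq_none_iff, List.findIdx?_eq_none_iff,
    List.find?_eq_none]
  constructor <;> intro h x hx
  · simp [h x hx]
  · rw [Bool.eq_false_iff]
    intro hc
    exact h x hx hc

theorem linkF : ∀ s : List Char,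
    (match scanWF s with | none => none | some w => letterMapA.get? w) = scanFwdB s := by
  intro s
  induction s with
  | nil => rfl
  | cons c r ih =>
    rw [scanWF, scanFwdB]
    cases hf : numbersA.find? (fun w => w.toList.isPrefixOf (c :: r)) with
    | none =>
      have hD : digitAtB (c :: r) = none := (digitAtB_none_iff (c :: r)).2 hf
      rw [hD]
      simpa using ih
    | some w =>
      have hL := idxLink (c :: r)
      rw [hf] at hL
      cases hD : digitAtB (c :: r) with
      | none => exact absurd hf (by rw [(digitAtB_none_iff (c :: r)).1 hD]; simp)
      | some d => rw [hD] at hL; simpa using hL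

theorem scanWB_mem : ∀ (s : List Char) (w : String), scanWB s = some w → w ∈ numbersA := by
  intro s
  induction s with
  | nil => intro w h; simp [scanWB] at h
  | cons c r ih =>
    intro w h
    rw [scanWB] at h
    cases hr : scanWB r with
    | some w' =>
      rw [hr] at h
      simp only [Option.some.injEq] at h
      subst h
      exact ih w' hr
    | none => rw [hr] at h; exact List.mem_of_find?_eq_some h

theorem get?_isSome : ∀ w ∈ numbersA, (letterMapA.get? w).isSome = true := by decide

theorem linkB : ∀ s : List Char,
    (match scanWB s with | none => none | some w => letterMapA.get? w) = scanBwdB s := by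
  intro s
  induction s with
  | nil => rfl
  | cons c r ih =>
    rw [scanWB, scanBwdB]
    cases hr : scanWB r with
    | some w =>
      rw [hr] at ih
      simp only at ih ⊢
      obtain ⟨v, hv⟩ := Option.isSome_iff_exists.1 (get?_isSome w (scanWB_mem r w hr))
      rw [← ih, hv]
    | none =>
      rw [hr] at ih
      have ih' : scanBwdB r = none := by simpa using ih.symm
      rw [ih']
      exact idxLink (c :: r)

theorem getFirstA_eq (code : String) : getFirstA code = scanFwdB code.toList := by
  rw [getFirstA]
  have hfn : (fun (st : Int × Option String) number =>
      let found := PySem.Str.find code number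
      if found = -1 then st
      else if st.1 = -1 ∨ found < st.1 then (found, some number) else st) =
      stepF (fun w => PySem.Chars.find code.toList w.toList) := by
    funext st w
    simp [stepF]
  rw [hfn, fwd_main, ← linkF]

theorem getSecondA_eq (code : String) : getSecondA code = scanBwdB code.toList := by
  rw [getSecondA]
  have hfn : (fun (st : Option Int × Option String) number =>
      let found := PySem.Str.rfind code number
      if found = -1 then st
      else
        match st.1 with
        | none => (some found, some number)
        | some l => if found > l then (some found, some number) else st) =
      stepG (fun w => PySem.Chars.rfind code.toList w.toList) := by
    funext st w
    simp [stepG]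
  rw [hfn, bwd_main, ← linkB]

theorem digitAtB_bounds (t : List Char) (d : Int) (h : digitAtB t = some d) :
    0 ≤ d ∧ d < 10 := by
  rw [digitAtB] at h
  cases hI : numbersA.findIdx? (fun w => PySem.Chars.startswith t w.toList) with
  | none => rw [hI] at h; simp at h
  | some k =>
    rw [hI] at h
    obtain ⟨hk, -, -⟩ := List.findIdx?_eq_some_iff_getElem.1 hI
    simp only [Option.map_some, Option.some.injEq] at h
    subst h
    simp [numbersA] at hk
    simp only [Int.ofNat_eq_natCast]
    omega

theorem scanFwdB_bounds : ∀ (s : List Char) (d : Int), scanFwdB s = some d → 0 ≤ d ∧ d < 10 := by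
  intro s
  induction s with
  | nil => intro d h; simp [scanFwdB] at h
  | cons c r ih =>
    intro d h
    rw [scanFwdB] at h
    cases hD : digitAtB (c :: r) with
    | some d' => rw [hD] at h; exact Option.some.inj h ▸ digitAtB_bounds _ _ hD
    | none => rw [hD] at h; exact ih d h

theorem scanBwdB_bounds : ∀ (s : List Char) (d : Int), scanBwdB s = some d → 0 ≤ d ∧ d < 10 := by
  intro s
  induction s with
  | nil => intro d h; simp [scanBwdB] at h
  | cons c r ih =>
    intro d h
    rw [scanBwdB] at h
    cases hr : scanBwdB r with
    | some d' => rw [hr] at h; exact Option.some.inj h ▸ ih d' hr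
    | none => rw [hr] at h; exact digitAtB_bounds _ _ h

theorem digits10 (a b : Int) (ha0 : 0 ≤ a) (ha : a < 10) (hb0 : 0 ≤ b) (hb : b < 10) :
    PySem.Int.ofChars? (PySem.Int.toChars a ++ PySem.Int.toChars b) = some (10 * a + b) := by
  interval_cases a <;> interval_cases b <;> decide

theorem percode : ∀ (acc : Option Int) (code : String),
    (do
      let total ← acc
      let first ← getFirstA code
      let second ← getSecondA code
      let number ← PySem.Int.ofChars? (PySem.Int.toChars first ++ PySem.Int.toChars second)
      pure (total + number)) =
    (do
      let total ← acc
      let first ← scanFwdB code.toList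
      let second ← scanBwdB code.toList
      pure (total + (10 * first + second)) : Option Int) := by
  intro acc code
  cases acc with
  | none => rfl
  | some t =>
    rw [getFirstA_eq, getSecondA_eq]
    cases hf : scanFwdB code.toList with
    | none => rfl
    | some f =>
      cases hs : scanBwdB code.toList with
      | none => rfl
      | some s =>
        obtain ⟨hf0, hf1⟩ := scanFwdB_bounds _ _ hf
        obtain ⟨hs0, hs1⟩ := scanBwdB_bounds _ _ hs
        simp [digits10 f s hf0 hf1 hs0 hs1]

theorem solve_eq (codes : List String) : solve codes = solve_alt codes := by
  rw [solve, solve_alt]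
  have hfn : (fun (acc : Option Int) code => do
      let total ← acc
      let first ← getFirstA code
      let second ← getSecondA code
      let number ← PySem.Int.ofChars? (PySem.Int.toChars first ++ PySem.Int.toChars second)
      pure (total + number)) =
      (fun (acc : Option Int) code => do
        let total ← acc
        let first ← scanFwdB code.toList
        let second ← scanBwdB code.toList
        pure (total + (10 * first + second))) :=
    funext fun acc => funext fun code => percode acc code
  rw [hfn]

-- ===== VERDICT (by name: the statement is the Claim_ definition above) =====
theorem solve_spec : Claim_equal_solve := by
  intro codes _ _
  show solve codes = solve_alt codes
  exact solve_eq codes
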